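-- pv_equiv track=rewrite | github.com/othmar-alejandro/keep-her-light-alive-foundation | content_agents.py | _find_common_phrases
-- ===== SOURCE A (Python) =====
-- from typing import Dict, List, Tuple, Set
--
-- def _find_common_phrases(words1: List[str], words2: List[str], min_length: int = 5) -> str:
--     """Find common phrases between two word lists"""
--     words1_lower = [w.lower() for w in words1]
--     words2_lower = [w.lower() for w in words2]
--
--     for length in range(min_length, min(len(words1), len(words2)) + 1):
--         for i in range(len(words1) - length + 1):
--             phrase = words1_lower[i:i+length]
--             phrase_str = ' '.join(phrase)
--
--             # Check if this phrase exists in words2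
--             for j in range(len(words2) - length + 1):
--                 if words2_lower[j:j+length] == phrase:
--                     return ' '.join(words1[i:i+length])
--
--     return ""
-- ===== SOURCE B (Python) =====
-- from typing import List
--
-- def _find_common_phrases(words1: List[str], words2: List[str], min_length: int = 5) -> str:
--     """Find common phrases between two word lists.
--
--     Any shared phrase of length > min_length contains a shared phrase of exactly
--     min_length words, so only windows of length min_length need to be checked:
--     hash all such windows of words2 into a set and scan words1 once.
--     """
--     L = min_length
--     if L < 1 or L > len(words1) or L > len(words2):
--         return ""
--     words2_lower = [w.lower() for w in words2]
--     windows = {tuple(words2_lower[j:j+L]) for j in range(len(words2) - L + 1)}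
--     words1_lower = [w.lower() for w in words1]
--     for i in range(len(words1) - L + 1):
--         if tuple(words1_lower[i:i+L]) in windows:
--             return ' '.join(words1[i:i+L])
--     return ""
-- ===== Notes on version B (the rewrite author's own statement) =====
-- stated objective: faster
-- what changed: Only windows of exactly min_length words can be the first match (any longer shared phrase contains one), so B drops A's triple nested loop over all lengths and positions and instead hashes all min_length-windows of words2 into a set and scans words1 once.
-- outside the precondition, e.g. on _find_common_phrases(['a', 'b', 'c'], ['a', 'b', 'c'], -2): A returns 'a', B returns ''
import Mathlib
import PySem

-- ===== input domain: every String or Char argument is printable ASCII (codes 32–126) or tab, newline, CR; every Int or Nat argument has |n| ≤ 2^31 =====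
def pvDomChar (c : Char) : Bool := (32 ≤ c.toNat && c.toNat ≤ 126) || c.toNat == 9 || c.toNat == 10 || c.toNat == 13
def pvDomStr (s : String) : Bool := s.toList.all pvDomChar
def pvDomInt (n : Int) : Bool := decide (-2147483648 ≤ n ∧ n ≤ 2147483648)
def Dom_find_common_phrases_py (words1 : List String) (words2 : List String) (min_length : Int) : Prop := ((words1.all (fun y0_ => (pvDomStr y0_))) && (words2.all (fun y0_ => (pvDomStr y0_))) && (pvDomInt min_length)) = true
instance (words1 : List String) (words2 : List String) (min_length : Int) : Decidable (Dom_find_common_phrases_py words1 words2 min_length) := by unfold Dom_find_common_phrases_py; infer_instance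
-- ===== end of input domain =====

-- B replaces A's triple nested scan over all phrase lengths by a single pass over words1
-- against a set of the min_length-windows of words2 (objective: faster; only the return
-- value is compared — neither version mutates its arguments).

-- ===== PORT A =====
-- a 'for k in range(a, b): ... return v ...' loop with an early return: try f at k, k+1, …
-- (fuel = number of iterations left); the range is consumed lazily, exactly like Python's
def pvForRange {β : Type} (f : Int → Option β) : Int → Nat → Option β
  | _, 0 => none
  | k, Nat.succ n =>
    match f k with
    | some b => some b
    | none => pvForRange f (k + 1) n

def find_common_phrases_py (words1 : List String) (words2 : List String) (min_length : Int) : String :=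
  let words1_lower := words1.map PySem.Str.lower
  let words2_lower := words2.map PySem.Str.lower
  (pvForRange
    (fun length =>
      pvForRange
        (fun i =>
          let phrase := PySem.List.slice words1_lower (some i) (some (i + length))
          pvForRange
            (fun j =>
              if PySem.List.slice words2_lower (some j) (some (j + length)) = phrase then
                some (PySem.Str.join " " (PySem.List.slice words1 (some i) (some (i + length))))
              else none)
            0 ((words2.length : Int) - length + 1).toNat)
        0 ((words1.length : Int) - length + 1).toNat)
    min_length (min (words1.length : Int) (words2.length : Int) + 1 - min_length).toNat).getD ""

-- ===== PORT B =====
def find_common_phrases_py_alt (words1 : List String) (words2 : List String) (min_length : Int) : String :=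
  if min_length < 1 ∨ (words1.length : Int) < min_length ∨ (words2.length : Int) < min_length then ""
  else
    let words2_lower := words2.map PySem.Str.lower
    let windows := PySem.Set.ofList
      ((PySem.List.pyRange 0 ((words2.length : Int) - min_length + 1) 1).map
        (fun j => PySem.List.slice words2_lower (some j) (some (j + min_length))))
    let words1_lower := words1.map PySem.Str.lower
    ((PySem.List.pyRange 0 ((words1.length : Int) - min_length + 1) 1).findSome?
      (fun i =>
        if PySem.Set.contains windows (PySem.List.slice words1_lower (some i) (some (i + min_length))) then
          some (PySem.Str.join " " (PySem.List.slice words1 (some i) (some (i + min_length))))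
        else none)).getD ""

-- ===== PRECONDITION & SPEC =====
-- Pre_ restricts to the natural domain of a phrase length: negative min_length is outside it;
-- there A's Python negative slices wrap around and compare accidental list fragments (A still
-- returns a string), while B naturally returns "".
def Pre_find_common_phrases_py (words1 : List String) (words2 : List String) (min_length : Int) : Prop :=
  0 ≤ min_length
instance (words1 : List String) (words2 : List String) (min_length : Int) : Decidable (Pre_find_common_phrases_py words1 words2 min_length) := by unfold Pre_find_common_phrases_py; infer_instance
def pvWitness_find_common_phrases_py : List String × List String × Int := (["a", "b"], ["x", "a", "b"], 2)

def Spec_find_common_phrases_py (words1 : List String) (words2 : List String) (min_length : Int) (out : String) : Prop := out = find_common_phrases_py_alt words1 words2 min_length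
instance (words1 : List String) (words2 : List String) (min_length : Int) (out : String) : Decidable (Spec_find_common_phrases_py words1 words2 min_length out) := by unfold Spec_find_common_phrases_py; infer_instance

-- ===== CLAIM (what is proved, stated in full; the proofs are below) =====
def Claim_equal_find_common_phrases_py : Prop := ∀ (words1 : List String) (words2 : List String) (min_length : Int), Dom_find_common_phrases_py words1 words2 min_length → Pre_find_common_phrases_py words1 words2 min_length → Spec_find_common_phrases_py words1 words2 min_length (find_common_phrases_py words1 words2 min_length)

-- ===== LEMMAS AND PROOFS =====

-- A's scan at one fixed phrase length (the body of A's outer loop), for reasoning.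
def pvPassA (words1 words2 : List String) (len : Int) : Option String :=
  (PySem.List.pyRange 0 ((words1.length : Int) - len + 1) 1).findSome?
    (fun i =>
      (PySem.List.pyRange 0 ((words2.length : Int) - len + 1) 1).findSome?
        (fun j =>
          if PySem.List.slice (words2.map PySem.Str.lower) (some j) (some (j + len)) =
              PySem.List.slice (words1.map PySem.Str.lower) (some i) (some (i + len)) then
            some (PySem.Str.join " " (PySem.List.slice words1 (some i) (some (i + len))))
          else none))

theorem pvFindSome?_congr_mem {α β : Type} {l : List α} {f g : α → Option β}
    (h : ∀ x ∈ l, f x = g x) : l.findSome? f = l.findSome? g := by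
  induction l with
  | nil => rfl
  | cons a t ih =>
    simp only [List.findSome?_cons, h a (by simp)]
    cases g a with
    | none => exact ih (fun x hx => h x (by simp [hx]))
    | some b => rfl

theorem pvForRange_eq {β : Type} (f : Int → Option β) (a b : Int) :
    pvForRange f a (b - a).toNat = (PySem.List.pyRange a b 1).findSome? f := by
  induction h : (b - a).toNat generalizing a with
  | zero =>
    rw [show PySem.List.pyRange a b 1 = [] by
      rw [PySem.List.pyRange_one, h]; rfl]
    rfl
  | succ n ih =>
    rw [PySem.List.pyRange_one_cons (by omega : a < b), List.findSome?_cons]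
    show (match f a with
          | some v => some v
          | none => pvForRange f (a + 1) n) = _
    cases f a with
    | some v => rfl
    | none => exact ih (a + 1) (by omega)

theorem pvForRange_eq_zero {β : Type} (f : Int → Option β) (b : Int) :
    pvForRange f 0 b.toNat = (PySem.List.pyRange 0 b 1).findSome? f := by
  rw [← pvForRange_eq f 0 b, Int.sub_zero]

theorem pvA_eq (words1 words2 : List String) (min_length : Int) :
    find_common_phrases_py words1 words2 min_length =
      ((PySem.List.pyRange min_length (min (words1.length : Int) (words2.length : Int) + 1) 1).findSome?
        (pvPassA words1 words2)).getD "" := by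
  unfold find_common_phrases_py pvPassA
  dsimp only
  rw [pvForRange_eq]
  congr 1
  apply pvFindSome?_congr_mem
  intro length _
  rw [pvForRange_eq_zero]
  apply pvFindSome?_congr_mem
  intro i _
  rw [pvForRange_eq_zero]

theorem pvFindSome?_if_const {α β : Type} (l : List α) (p : α → Prop) [DecidablePred p] (c : β) :
    l.findSome? (fun x => if p x then some c else none) =
      if ∃ x ∈ l, p x then some c else none := by
  induction l with
  | nil => simp
  | cons a t ih =>
    by_cases hpa : p a
    · simp [List.findSome?_cons, hpa]
    · simp only [List.findSome?_cons, if_neg hpa, ih]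
      by_cases ht : ∃ x ∈ t, p x
      · rw [if_pos ht, if_pos (by simpa using Or.inr ht)]
      · rw [if_neg ht, if_neg (by simp [hpa, ht])]

-- "a shared lowercased window of ℓ words exists"
def pvHasM (words1 words2 : List String) (ℓ : Nat) : Prop :=
  ∃ a b : Nat, a + ℓ ≤ words1.length ∧ b + ℓ ≤ words2.length ∧
    ((words1.map PySem.Str.lower).drop a).take ℓ = ((words2.map PySem.Str.lower).drop b).take ℓ

theorem pvHasM_mono {words1 words2 : List String} {ℓ k : Nat}
    (h : pvHasM words1 words2 ℓ) (hk : k ≤ ℓ) : pvHasM words1 words2 k := by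
  obtain ⟨a, b, h1, h2, he⟩ := h
  refine ⟨a, b, by omega, by omega, ?_⟩
  have := congrArg (List.take k) he
  simpa [List.take_take, Nat.min_eq_left hk] using this

theorem pvHasM_iff (words1 words2 : List String) (ℓ : Nat) :
    pvHasM words1 words2 ℓ ↔
      ∃ i ∈ PySem.List.pyRange 0 ((words1.length : Int) - (ℓ : Int) + 1) 1,
        ∃ j ∈ PySem.List.pyRange 0 ((words2.length : Int) - (ℓ : Int) + 1) 1,
          PySem.List.slice (words2.map PySem.Str.lower) (some j) (some (j + (ℓ : Int))) =
            PySem.List.slice (words1.map PySem.Str.lower) (some i) (some (i + (ℓ : Int))) := by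
  constructor
  · rintro ⟨a, b, h1, h2, he⟩
    refine ⟨(a : Int), ?_, (b : Int), ?_, ?_⟩
    · rw [PySem.List.mem_pyRange_one]; constructor <;> push_cast <;> omega
    · rw [PySem.List.mem_pyRange_one]; constructor <;> push_cast <;> omega
    · rw [PySem.List.slice_natCast_add, PySem.List.slice_natCast_add]
      simpa using he.symm
  · rintro ⟨i, hi, j, hj, he⟩
    rw [PySem.List.mem_pyRange_one] at hi hj
    refine ⟨i.toNat, j.toNat, by omega, by omega, ?_⟩
    rw [show i = ((i.toNat : Nat) : Int) from (Int.toNat_of_nonneg hi.1).symm,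
        show j = ((j.toNat : Nat) : Int) from (Int.toNat_of_nonneg hj.1).symm] at he
    rw [PySem.List.slice_natCast_add, PySem.List.slice_natCast_add] at he
    simpa using he.symm

theorem pvPassA_eq_none_iff (words1 words2 : List String) (len : Int) (h0 : 0 ≤ len) :
    pvPassA words1 words2 len = none ↔ ¬ pvHasM words1 words2 len.toNat := by
  rw [show len = ((len.toNat : Nat) : Int) from (Int.toNat_of_nonneg h0).symm]
  simp only [Int.toNat_natCast]
  rw [pvHasM_iff]
  unfold pvPassA
  rw [List.findSome?_eq_none_iff]
  constructor
  · rintro h ⟨i, hi, j, hj, he⟩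
    have := h i hi
    rw [List.findSome?_eq_none_iff] at this
    have := this j hj
    rw [if_pos he] at this
    exact Option.some_ne_none _ this
  · intro h i hi
    rw [List.findSome?_eq_none_iff]
    intro j hj
    exact if_neg (fun he => h ⟨i, hi, j, hj, he⟩)

theorem find_common_phrases_py_spec_aux (words1 words2 : List String) (L : Int) (hpre : 0 ≤ L) :
    find_common_phrases_py words1 words2 L = find_common_phrases_py_alt words1 words2 L := by
  rw [pvA_eq]
  by_cases hL1 : L < 1
  · -- L = 0: A's first probe (length 0, i = 0, j = 0) matches the empty phrase and returns ""
    have hL0 : L = 0 := by omega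
    subst hL0
    have halt : find_common_phrases_py_alt words1 words2 0 = "" := by
      unfold find_common_phrases_py_alt
      rw [if_pos (Or.inl (by norm_num))]
    rw [halt]
    have hjoin : PySem.Str.join " " ([] : List String) = "" := rfl
    have h0' : ∀ (xs : List String), PySem.List.slice xs none (some (0:Int)) = [] := by
      intro xs
      simpa using PySem.List.slice_to (xs := xs) (b := 0) (by norm_num)
    have hpass : pvPassA words1 words2 0 = some "" := by
      unfold pvPassA
      rw [PySem.List.pyRange_one_cons (by omega : (0:Int) < (words1.length : Int) - 0 + 1)]
      rw [PySem.List.pyRange_one_cons (by omega : (0:Int) < (words2.length : Int) - 0 + 1)]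
      simp [List.findSome?_cons, h0', hjoin]
    rw [PySem.List.pyRange_one_cons
      (by omega : (0:Int) < min (words1.length : Int) (words2.length : Int) + 1)]
    rw [List.findSome?_cons, hpass]
    rfl
  · have hL : 1 ≤ L := by omega
    by_cases hBig : (words1.length : Int) < L ∨ (words2.length : Int) < L
    · -- the outer range is empty; B's guard fires
      have hempty : PySem.List.pyRange L (min (words1.length : Int) (words2.length : Int) + 1) 1 = [] := by
        rw [PySem.List.pyRange_one]
        have : (min (words1.length : Int) (words2.length : Int) + 1 - L).toNat = 0 := by omega
        rw [this]; rfl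
      rw [hempty]
      unfold find_common_phrases_py_alt
      rw [if_pos (Or.inr hBig)]
      rfl
    · push_neg at hBig
      obtain ⟨h1, h2⟩ := hBig
      -- B equals A's scan at length L
      have hBpass : find_common_phrases_py_alt words1 words2 L = (pvPassA words1 words2 L).getD "" := by
        unfold find_common_phrases_py_alt
        rw [if_neg (by push_neg; exact ⟨by omega, h1, h2⟩)]
        unfold pvPassA
        dsimp only
        congr 1
        apply pvFindSome?_congr_mem
        intro i _
        rw [pvFindSome?_if_const]
        apply if_congr _ rfl rfl
        rw [PySem.Set.contains_iff, PySem.Set.mem_ofList, List.mem_map]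
      rw [hBpass]
      cases hsome : pvPassA words1 words2 L with
      | some s =>
        rw [PySem.List.pyRange_one_cons
          (by omega : L < min (words1.length : Int) (words2.length : Int) + 1)]
        rw [List.findSome?_cons]
        rw [hsome]
      | none =>
        have hnoM : ¬ pvHasM words1 words2 L.toNat :=
          (pvPassA_eq_none_iff words1 words2 L hpre).mp hsome
        have houter : (PySem.List.pyRange L (min (words1.length : Int) (words2.length : Int) + 1) 1).findSome?
            (pvPassA words1 words2) = none := by
          rw [List.findSome?_eq_none_iff]
          intro len hlen
          rw [PySem.List.mem_pyRange_one] at hlen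
          rw [pvPassA_eq_none_iff words1 words2 len (by omega)]
          intro hM
          exact hnoM (pvHasM_mono hM (by omega))
        rw [houter]

-- ===== VERDICT (by name: the statement is the Claim_ definition above) =====
theorem find_common_phrases_py_spec : Claim_equal_find_common_phrases_py := by
  intro words1 words2 min_length _ hpre
  unfold Spec_find_common_phrases_py
  exact find_common_phrases_py_spec_aux words1 words2 min_length hpre
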